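-- pv_equiv track=rewrite | github.com/AdonisCodes/stocks-sentiment-scraper | src/helpers/parsers.py | clean_list
-- ===== SOURCE A (Python) =====
-- def clean_list(l):
--     c = []
--     for k in l:
--         try:
--             cleaned_str = (
--                 f"{k}".replace(",", "")
--                 .replace('"', "'")
--                 .replace('\n', '')
--                 .replace('\r', '')
--                 .replace('\t', '')
--                 .replace("\\", "")
--             )
--             cleaned_str.encode('utf-8')  # Try encoding the cleaned string
--             c.append(cleaned_str)
--         except UnicodeEncodeError:
--             # Handle the case where encoding fails
--             c.append("UNABLE_TO_ENCODE")
--     return c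
-- ===== SOURCE B (Python) =====
-- _DROP = frozenset(',\n\r\t\\')
--
--
-- def _clean_one(s):
--     cleaned = "".join("'" if ch == '"' else ch for ch in s if ch not in _DROP)
--     try:
--         cleaned.encode('utf-8')
--         return cleaned
--     except UnicodeEncodeError:
--         return "UNABLE_TO_ENCODE"
--
--
-- def clean_list(l):
--     return [_clean_one(f"{k}") for k in l]
-- ===== Notes on version B (the rewrite author's own statement) =====
-- stated objective: idiomatic
-- what changed: Replaces A's six sequential full-string replace passes per element with one single character-level pass (a filter/map comprehension over a frozenset of characters to drop), keeping the encode check and sentinel.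
import Mathlib
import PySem

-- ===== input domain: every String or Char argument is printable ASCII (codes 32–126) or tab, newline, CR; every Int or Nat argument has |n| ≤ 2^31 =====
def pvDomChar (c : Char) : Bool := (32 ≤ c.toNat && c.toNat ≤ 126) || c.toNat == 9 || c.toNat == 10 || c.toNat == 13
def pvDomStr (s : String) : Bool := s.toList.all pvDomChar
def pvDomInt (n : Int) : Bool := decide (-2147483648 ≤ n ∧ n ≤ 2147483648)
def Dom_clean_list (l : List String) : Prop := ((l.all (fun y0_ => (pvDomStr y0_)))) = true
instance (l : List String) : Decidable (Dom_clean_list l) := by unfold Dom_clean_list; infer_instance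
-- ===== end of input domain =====

-- B replaces A's six sequential full-string replace passes per element with one
-- character-level filter/map pass; same return values. On the ASCII domain the
-- utf-8 encode check of both Pythons never raises, so neither port has the
-- except branch.

-- ===== PORT A =====
def clean_list (l : List String) : List String :=
  l.foldl (fun c k =>
    c ++ [PySem.Str.replace (PySem.Str.replace (PySem.Str.replace (PySem.Str.replace
            (PySem.Str.replace (PySem.Str.replace k "," "") "\"" "'")
            "\n" "") "\r" "") "\t" "") "\\" ""]) []

-- ===== PORT B =====
def pvDropB (ch : Char) : Bool :=
  ch == ',' || ch == '\n' || ch == '\r' || ch == '\t' || ch == '\\'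

def clean_one (s : String) : String :=
  String.ofList ((s.toList.filter (fun ch => !pvDropB ch)).map
    (fun ch => if ch == '"' then '\'' else ch))

def clean_list_alt (l : List String) : List String :=
  l.map clean_one

-- ===== PRECONDITION & SPEC =====
def Spec_clean_list (l : List String) (out : List String) : Prop := out = clean_list_alt l
instance (l : List String) (out : List String) : Decidable (Spec_clean_list l out) := by unfold Spec_clean_list; infer_instance

-- ===== CLAIM (what is proved, stated in full; the proofs are below) =====
def Claim_equal_clean_list : Prop := ∀ (l : List String), Dom_clean_list l → Spec_clean_list l (clean_list l)

-- ===== LEMMAS AND PROOFS =====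

-- single-character pattern: the fuel loop of Chars.replace is a flatMap
theorem replace_go_single (a : Char) (new : List Char) :
    ∀ (fuel : Nat) (l acc : List Char), l.length ≤ fuel →
      PySem.Chars.replace.go [a] new fuel l acc
        = acc.reverse ++ l.flatMap (fun c => if c = a then new else [c]) := by
  intro fuel
  induction fuel with
  | zero =>
    intro l acc h
    have : l = [] := List.eq_nil_of_length_eq_zero (Nat.le_zero.mp h)
    subst this
    simp [PySem.Chars.replace.go]
  | succ n ih =>
    intro l acc h
    cases l with
    | nil => simp [PySem.Chars.replace.go]
    | cons c t =>
      by_cases hc : c = a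
      · subst hc
        have hpre : List.isPrefixOf [c] (c :: t) = true := by
          simp [List.isPrefixOf]
        rw [PySem.Chars.replace.go]
        simp only [hpre, if_true, List.length_cons, List.length_nil, Nat.zero_add,
          List.drop_succ_cons, List.drop_zero]
        rw [ih t (new.reverse ++ acc) (Nat.le_of_succ_le_succ h)]
        simp
      · have hpre : List.isPrefixOf [a] (c :: t) = false := by
          simp [List.isPrefixOf]
          exact fun hh => absurd hh.symm hc
        rw [PySem.Chars.replace.go]
        rw [if_neg (by simp [hpre])]
        rw [ih t (c :: acc) (Nat.le_of_succ_le_succ h)]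
        simp [hc]

theorem replace_single (cs : List Char) (a : Char) (new : List Char) :
    PySem.Chars.replace cs [a] new = cs.flatMap (fun c => if c = a then new else [c]) := by
  rw [PySem.Chars.replace]
  simp only [List.isEmpty_cons, Bool.false_eq_true, if_false]
  exact replace_go_single a new cs.length cs [] (le_refl _)

-- the six single-character replaces are exactly the one filter/map pass
theorem clean_chars_eq (cs : List Char) :
    PySem.Chars.replace (PySem.Chars.replace (PySem.Chars.replace (PySem.Chars.replace
        (PySem.Chars.replace (PySem.Chars.replace cs [','] []) ['"'] ['\''])
        ['\n'] []) ['\r'] []) ['\t'] []) ['\\'] []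
      = (cs.filter (fun ch => !pvDropB ch)).map (fun ch => if ch == '"' then '\'' else ch) := by
  simp only [replace_single]
  induction cs with
  | nil => simp
  | cons c t ih =>
    simp only [List.flatMap_cons, List.flatMap_append, List.filter_cons]
    rw [ih]
    by_cases h1 : c = ','
    · subst h1; simp [pvDropB]
    · by_cases h2 : c = '"'
      · subst h2; simp [pvDropB]
      · by_cases h3 : c = '\n'
        · subst h3; simp [pvDropB]
        · by_cases h4 : c = '\r'
          · subst h4; simp [pvDropB]
          · by_cases h5 : c = '\t'
            · subst h5; simp [pvDropB]
            · by_cases h6 : c = '\\'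
              · subst h6; simp [pvDropB]
              · simp [pvDropB, h1, h2, h3, h4, h5, h6]

theorem clean_one_eq (k : String) :
    PySem.Str.replace (PySem.Str.replace (PySem.Str.replace (PySem.Str.replace
        (PySem.Str.replace (PySem.Str.replace k "," "") "\"" "'")
        "\n" "") "\r" "") "\t" "") "\\" "" = clean_one k := by
  simp only [PySem.Str.replace, String.toList_ofList, clean_one]
  rw [show ",".toList = [','] from rfl, show "\"".toList = ['"'] from rfl,
      show "'".toList = ['\''] from rfl, show "\n".toList = ['\n'] from rfl,
      show "\r".toList = ['\r'] from rfl, show "\t".toList = ['\t'] from rfl,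
      show "\\".toList = ['\\'] from rfl, show "".toList = [] from rfl]
  rw [clean_chars_eq]

-- ===== VERDICT (by name: the statement is the Claim_ definition above) =====
theorem clean_list_spec : Claim_equal_clean_list := by
  intro l _
  show clean_list l = clean_list_alt l
  unfold clean_list clean_list_alt
  rw [PySem.List.foldl_append_singleton_eq_map]
  exact List.map_congr_left (fun k _ => clean_one_eq k)
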